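-- pv_equiv track=rewrite | github.com/amohith7/jhfrc-address2tract | src/phi_validator.py | check_for_phi
-- ===== SOURCE A (Python) =====
-- PHI_INDICATORS = [
--     "name", "first_name", "last_name", "firstname", "lastname",
--     "patient_name", "patientname", "full_name", "fullname",
--     "date_of_birth", "dob", "birth_date", "birthdate",
--     "ssn", "social_security", "social_security_number",
--     "medical_record_number", "mrn",
--     "diagnosis", "diagnoses",
--     "insurance", "insurance_id",
--     "phone", "phone_number", "telephone",
--     "email", "email_address",
--     "notes", "clinical_notes",
-- ]
--
-- def _matches_phi(column: str, indicator: str) -> bool: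
--     """
--     Check whether a column name matches a PHI indicator.
--     Matches are made at word boundaries (underscore-delimited tokens),
--     so 'filename' does not match 'name', but 'patient_name' does.
--     """
--     col_norm = column.lower().strip().replace(" ", "_")
--     indicator_parts = indicator.lower().replace(" ", "_").split("_")
--     col_parts = col_norm.split("_")
--
--     # Exact match
--     if col_norm == "_".join(indicator_parts):
--         return True
--
--     # Match as a contiguous token sequence within the column name parts
--     n = len(indicator_parts)
--     for i in range(len(col_parts) - n + 1):
--         if col_parts[i : i + n] == indicator_parts:
--             return True
--
--     return False
--
-- def check_for_phi(columns: list) -> list: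
--     """
--     Check column names for PHI indicators.
--     Returns a list of flagged column names.
--     """
--     flagged = []
--     for col in columns:
--         for indicator in PHI_INDICATORS:
--             if _matches_phi(col, indicator):
--                 flagged.append(col)
--                 break
--     return flagged
-- ===== SOURCE B (Python) =====
-- PHI_INDICATORS = [
--     "name", "first_name", "last_name", "firstname", "lastname",
--     "patient_name", "patientname", "full_name", "fullname",
--     "date_of_birth", "dob", "birth_date", "birthdate",
--     "ssn", "social_security", "social_security_number",
--     "medical_record_number", "mrn",
--     "diagnosis", "diagnoses",
--     "insurance", "insurance_id",
--     "phone", "phone_number", "telephone",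
--     "email", "email_address",
--     "notes", "clinical_notes",
-- ]
--
-- def check_for_phi(columns: list) -> list:
--     # Index the indicators once: each indicator becomes a normalized token tuple.
--     keys = {tuple(ind.lower().replace(" ", "_").split("_")) for ind in PHI_INDICATORS}
--     lengths = {len(k) for k in keys}
--     flagged = []
--     for col in columns:
--         parts = col.lower().strip().replace(" ", "_").split("_")
--         if any(tuple(parts[i:i + n]) in keys
--                for n in lengths
--                for i in range(len(parts) - n + 1)):
--             flagged.append(col)
--     return flagged
-- ===== Notes on version B (the rewrite author's own statement) =====
-- stated objective: faster
-- what changed: Instead of re-normalizing and scanning every column against each of the 29 indicators, B precomputes a set of normalized indicator token-tuples (and their distinct lengths) once, then flags a column iff any contiguous n-gram of its own token list is in that set.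
import Mathlib
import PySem

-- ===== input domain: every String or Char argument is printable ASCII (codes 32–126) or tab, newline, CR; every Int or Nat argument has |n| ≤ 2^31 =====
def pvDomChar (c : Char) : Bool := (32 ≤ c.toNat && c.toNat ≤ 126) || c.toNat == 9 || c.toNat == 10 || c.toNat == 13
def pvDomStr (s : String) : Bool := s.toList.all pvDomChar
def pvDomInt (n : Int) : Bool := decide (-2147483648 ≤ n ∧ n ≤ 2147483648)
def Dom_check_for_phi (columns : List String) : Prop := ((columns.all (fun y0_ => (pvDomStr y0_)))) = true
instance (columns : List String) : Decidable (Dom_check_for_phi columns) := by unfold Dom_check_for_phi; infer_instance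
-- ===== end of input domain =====

-- B indexes the indicators once into a set of normalized token-tuples and scans each
-- column's own n-grams against it (constant-factor speedup); A scans every column
-- against all 29 indicators.

-- s.split("_"): PySem.Str has no String-level splitOn; PySem.Chars.splitOn is the exact
-- sep ≠ "" form of Python str.split, lifted here through toList/String.ofList.
def splitU (s : String) : List String :=
  (PySem.Chars.splitOn s.toList ['_']).map String.ofList

-- shared module constant (PHI_INDICATORS in the Python module)
def phiIndicators : List String := [
  "name", "first_name", "last_name", "firstname", "lastname",
  "patient_name", "patientname", "full_name", "fullname",
  "date_of_birth", "dob", "birth_date", "birthdate",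
  "ssn", "social_security", "social_security_number",
  "medical_record_number", "mrn",
  "diagnosis", "diagnoses",
  "insurance", "insurance_id",
  "phone", "phone_number", "telephone",
  "email", "email_address",
  "notes", "clinical_notes"]

-- ===== PORT A =====
def matchesPhi (column : String) (indicator : String) : Bool :=
  let colNorm := PySem.Str.replace (PySem.Str.strip (PySem.Str.lower column)) " " "_"
  let indicatorParts := splitU (PySem.Str.replace (PySem.Str.lower indicator) " " "_")
  let colParts := splitU colNorm
  if colNorm = PySem.Str.join "_" indicatorParts then true
  else
    let n : Int := indicatorParts.length
    (PySem.List.pyRange 0 ((colParts.length : Int) - n + 1) 1).any fun i =>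
      PySem.List.slice colParts (some i) (some (i + n)) == indicatorParts

def check_for_phi (columns : List String) : List String :=
  columns.foldl (fun flagged col =>
    if phiIndicators.any (fun indicator => matchesPhi col indicator) then
      flagged ++ [col]
    else flagged) []

-- ===== PORT B =====
def normKey (ind : String) : List String :=
  splitU (PySem.Str.replace (PySem.Str.lower ind) " " "_")

def check_for_phi_alt (columns : List String) : List String :=
  let keys : PySem.Set (List String) := PySem.Set.ofList (phiIndicators.map normKey)
  let lengths : PySem.Set Int := PySem.Set.ofList (keys.map (fun k => (k.length : Int)))
  columns.foldl (fun flagged col =>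
    let parts := splitU
      (PySem.Str.replace (PySem.Str.strip (PySem.Str.lower col)) " " "_")
    if lengths.any (fun n =>
        (PySem.List.pyRange 0 ((parts.length : Int) - n + 1) 1).any fun i =>
          PySem.Set.contains keys (PySem.List.slice parts (some i) (some (i + n)))) then
      flagged ++ [col]
    else flagged) []

-- ===== PRECONDITION & SPEC =====
def Spec_check_for_phi (columns : List String) (out : List String) : Prop := out = check_for_phi_alt columns
instance (columns : List String) (out : List String) : Decidable (Spec_check_for_phi columns out) := by unfold Spec_check_for_phi; infer_instance

-- ===== CLAIM (what is proved, stated in full; the proofs are below) =====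
def Claim_equal_check_for_phi : Prop := ∀ (columns : List String), Dom_check_for_phi columns → Spec_check_for_phi columns (check_for_phi columns)

-- ===== LEMMAS AND PROOFS =====

-- stepping behaviour of PySem.Chars.splitOn.go for a single-char separator
lemma go_nil (c : Char) (fuel : Nat) (cur : List Char) (acc' : List (List Char)) :
    PySem.Chars.splitOn.go [c] (fuel + 1) [] cur acc' = (cur.reverse :: acc').reverse := by
  simp [PySem.Chars.splitOn.go]

lemma go_cons_ne (c x : Char) (l cur : List Char) (acc : List (List Char)) (fuel : Nat)
    (hx : x ≠ c) :
    PySem.Chars.splitOn.go [c] (fuel + 1) (x :: l) cur acc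
      = PySem.Chars.splitOn.go [c] fuel l (x :: cur) acc := by
  simp [PySem.Chars.splitOn.go, List.isPrefixOf, Ne.symm hx]

lemma go_cons_sep (c : Char) (l cur : List Char) (acc : List (List Char)) (fuel : Nat) :
    PySem.Chars.splitOn.go [c] (fuel + 1) (c :: l) cur acc
      = PySem.Chars.splitOn.go [c] fuel l [] (cur.reverse :: acc) := by
  simp [PySem.Chars.splitOn.go, List.isPrefixOf]

-- every piece produced by go is free of the separator (given enough fuel)
lemma go_clean (c : Char) : ∀ (l : List Char) (fuel : Nat) (cur : List Char)
    (acc : List (List Char)), l.length ≤ fuel → (∀ p ∈ acc, c ∉ p) → c ∉ cur →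
    ∀ p ∈ PySem.Chars.splitOn.go [c] (fuel + 1) l cur acc, c ∉ p := by
  intro l
  induction l with
  | nil =>
    intro fuel cur acc _ hacc hcur p hp
    rw [go_nil] at hp
    simp only [List.mem_reverse, List.mem_cons] at hp
    rcases hp with h | h
    · subst h; simpa using hcur
    · exact hacc p h
  | cons x rest ih =>
    intro fuel cur acc hlen hacc hcur p hp
    obtain ⟨f, rfl⟩ : ∃ f, fuel = f + 1 := ⟨fuel - 1, by simp at hlen; omega⟩
    by_cases hx : x = c
    · subst hx
      rw [go_cons_sep] at hp
      refine ih f [] (cur.reverse :: acc) (by simp at hlen; omega) ?_ (by simp) p hp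
      intro q hq
      rcases List.mem_cons.mp hq with h | h
      · subst h; simpa using hcur
      · exact hacc q h
    · rw [go_cons_ne c x rest cur acc (f + 1) hx] at hp
      refine ih f (x :: cur) acc (by simp at hlen; omega) hacc ?_ p hp
      intro hmem
      rcases List.mem_cons.mp hmem with h | h
      · exact hx h.symm
      · exact hcur h

lemma go_ne_nil (c : Char) : ∀ (l : List Char) (fuel : Nat) (cur : List Char)
    (acc : List (List Char)), l.length ≤ fuel →
    PySem.Chars.splitOn.go [c] (fuel + 1) l cur acc ≠ [] := by
  intro l
  induction l with
  | nil => intro fuel cur acc _; rw [go_nil]; simp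
  | cons x rest ih =>
    intro fuel cur acc hlen
    obtain ⟨f, rfl⟩ : ∃ f, fuel = f + 1 := ⟨fuel - 1, by simp at hlen; omega⟩
    by_cases hx : x = c
    · subst hx; rw [go_cons_sep]; exact ih f [] _ (by simp at hlen; omega)
    · rw [go_cons_ne c x rest cur acc (f + 1) hx]
      exact ih f (x :: cur) acc (by simp at hlen; omega)

-- go consumes a separator-free prefix into cur
lemma go_append_clean (c : Char) : ∀ (p l cur : List Char) (acc : List (List Char))
    (fuel : Nat), c ∉ p →
    PySem.Chars.splitOn.go [c] (p.length + fuel + 1) (p ++ l) cur acc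
      = PySem.Chars.splitOn.go [c] (fuel + 1) l (p.reverse ++ cur) acc := by
  intro p
  induction p with
  | nil => intro l cur acc fuel _; simp
  | cons x q ih =>
    intro l cur acc fuel hcp
    have hx : x ≠ c := fun h => hcp (h ▸ List.mem_cons_self ..)
    have hq : c ∉ q := fun h => hcp (List.mem_cons_of_mem _ h)
    have harr : (x :: q).length + fuel + 1 = (q.length + fuel + 1) + 1 := by simp; omega
    rw [harr, List.cons_append, go_cons_ne c x (q ++ l) cur acc _ hx, ih l (x :: cur) acc fuel hq]
    simp

-- go on a '_'-joined list of clean parts returns exactly those parts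
lemma go_join (c : Char) : ∀ (ps : List (List Char)) (p0 : List Char) (fuel : Nat)
    (cur : List Char) (acc : List (List Char)),
    c ∉ p0 → (∀ p ∈ ps, c ∉ p) → (PySem.Chars.join [c] (p0 :: ps)).length ≤ fuel →
    PySem.Chars.splitOn.go [c] (fuel + 1) (PySem.Chars.join [c] (p0 :: ps)) cur acc
      = acc.reverse ++ [cur.reverse ++ p0] ++ ps := by
  intro ps
  induction ps with
  | nil =>
    intro p0 fuel cur acc hp0 _ hlen
    rw [PySem.Chars.join_singleton] at hlen ⊢
    obtain ⟨f, rfl⟩ := Nat.le.dest hlen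
    have h := go_append_clean c p0 [] cur acc f hp0
    rw [List.append_nil] at h
    rw [h, go_nil]
    simp
  | cons p1 ps' ih =>
    intro p0 fuel cur acc hp0 hps hlen
    rw [PySem.Chars.join_cons_cons] at hlen ⊢
    have hlen' : (PySem.Chars.join [c] (p1 :: ps')).length + 1 + p0.length ≤ fuel := by
      simp at hlen; omega
    obtain ⟨f, hf⟩ := Nat.le.dest hlen'
    have hf2 : fuel = p0.length + ((PySem.Chars.join [c] (p1 :: ps')).length + 1 + f) := by omega
    rw [hf2, List.append_assoc,
        go_append_clean c p0 ([c] ++ PySem.Chars.join [c] (p1 :: ps')) cur acc _ hp0]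
    have : (PySem.Chars.join [c] (p1 :: ps')).length + 1 + f = ((PySem.Chars.join [c] (p1 :: ps')).length + f) + 1 := by omega
    rw [this, List.singleton_append, go_cons_sep,
        ih p1 _ [] ((p0.reverse ++ cur).reverse :: acc)
          (hps p1 (List.mem_cons_self ..)) (fun p hp => hps p (List.mem_cons_of_mem _ hp))
          (Nat.le_add_right _ _)]
    simp

lemma chars_splitOn_join (c : Char) (ps : List (List Char)) (hne : ps ≠ [])
    (hclean : ∀ p ∈ ps, c ∉ p) :
    PySem.Chars.splitOn (PySem.Chars.join [c] ps) [c] = ps := by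
  cases ps with
  | nil => exact absurd rfl hne
  | cons p0 ps' =>
    show PySem.Chars.splitOn.go _ _ _ _ _ = _
    rw [go_join c ps' p0 (PySem.Chars.join [c] (p0 :: ps')).length [] []
        (hclean p0 (List.mem_cons_self ..)) (fun p hp => hclean p (List.mem_cons_of_mem _ hp))
        (le_refl _)]
    simp

lemma splitU_pieces (s : String) :
    splitU s ≠ [] ∧ ∀ p ∈ splitU s, '_' ∉ p.toList := by
  constructor
  · unfold splitU PySem.Chars.splitOn
    intro h
    exact go_ne_nil '_' s.toList s.toList.length [] [] (le_refl _) (by simpa using h)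
  · intro p hp
    unfold splitU at hp
    obtain ⟨q, hq, rfl⟩ := List.mem_map.mp hp
    rw [String.toList_ofList]
    exact go_clean '_' s.toList s.toList.length [] [] (le_refl _) (by simp) (by simp) q hq

lemma splitU_join (ps : List String) (hne : ps ≠ [])
    (hclean : ∀ p ∈ ps, '_' ∉ p.toList) :
    splitU (PySem.Str.join "_" ps) = ps := by
  show (PySem.Chars.splitOn (PySem.Str.join "_" ps).toList ['_']).map String.ofList = ps
  rw [PySem.Str.toList_join, show "_".toList = ['_'] from rfl,
      chars_splitOn_join '_' (ps.map String.toList) (by simpa using hne)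
        (by intro p hp; obtain ⟨q, hq, rfl⟩ := List.mem_map.mp hp; exact hclean q hq)]
  simp [Function.comp_def]

lemma splitU_join_splitU (s : String) :
    splitU (PySem.Str.join "_" (splitU s)) = splitU s :=
  splitU_join _ (splitU_pieces s).1 (splitU_pieces s).2

lemma hall_phi : ∀ ind ∈ phiIndicators, splitU (PySem.Str.join "_" (normKey ind)) = normKey ind :=
  fun ind _ => splitU_join_splitU (PySem.Str.replace (PySem.Str.lower ind) " " "_")

-- the n-gram test both programs reduce to
def ngram (P k : List String) : Bool :=
  (PySem.List.pyRange 0 ((P.length : Int) - (k.length : Int) + 1) 1).any fun i =>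
    PySem.List.slice P (some i) (some (i + (k.length : Int))) == k

lemma ngram_self (k : List String) : ngram k k = true := by
  unfold ngram
  have h1 : ((k.length : Int) - (k.length : Int) + 1) = 0 + 1 := by ring
  rw [h1, PySem.List.pyRange_one_singleton]
  have h0 : (0 : Int) = ((0 : Nat) : Int) := rfl
  simp only [List.any_cons, List.any_nil, Bool.or_false, h0, PySem.List.slice_natCast_add]
  simp

lemma matchesPhi_eq (col ind : String)
    (h3 : splitU (PySem.Str.join "_" (normKey ind)) = normKey ind) :
    matchesPhi col ind =
      ngram (splitU (PySem.Str.replace (PySem.Str.strip (PySem.Str.lower col)) " " "_"))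
            (normKey ind) := by
  simp only [matchesPhi, normKey] at *
  split_ifs with h
  · rw [h, h3]
    exact (ngram_self _).symm
  · rfl

lemma any_indicators_eq (col : String) :
    phiIndicators.any (fun indicator => matchesPhi col indicator) =
      (phiIndicators.map normKey).any
        (fun k => ngram (splitU (PySem.Str.replace (PySem.Str.strip (PySem.Str.lower col)) " " "_")) k) := by
  have hall : ∀ ind ∈ phiIndicators, splitU (PySem.Str.join "_" (normKey ind)) = normKey ind :=
    hall_phi
  simp only [List.any_map, Function.comp_def]
  apply PySem.List.any_congr_mem
  intro ind hind
  exact matchesPhi_eq col ind (hall ind hind)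

-- the indicator-set scan of B tests the same existence as A's per-key scan
lemma set_scan_eq (KEYS : List (List String)) (P : List String) :
    KEYS.any (fun k => ngram P k) =
      (PySem.Set.ofList ((PySem.Set.ofList KEYS).map (fun k => (k.length : Int)))).any
        (fun n =>
          (PySem.List.pyRange 0 ((P.length : Int) - n + 1) 1).any fun i =>
            PySem.Set.contains (PySem.Set.ofList KEYS)
              (PySem.List.slice P (some i) (some (i + n)))) := by
  rw [Bool.eq_iff_iff]
  simp only [List.any_eq_true, ngram, PySem.Set.contains_iff, PySem.Set.mem_ofList,
    List.mem_map, beq_iff_eq]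
  constructor
  · rintro ⟨k, hk, i, hi, hsl⟩
    exact ⟨(k.length : Int), ⟨k, hk, rfl⟩, i, hi, by rw [hsl]; exact hk⟩
  · rintro ⟨n, ⟨k', hk', hn⟩, i, hi, hmem⟩
    obtain ⟨h0i, hiu⟩ := PySem.List.mem_pyRange_one.mp hi
    have hn0 : 0 ≤ n := by omega
    obtain ⟨j, rfl⟩ := Int.eq_ofNat_of_zero_le h0i
    obtain ⟨m, rfl⟩ := Int.eq_ofNat_of_zero_le hn0
    rw [PySem.List.slice_natCast_add] at hmem
    have hjm : j + m ≤ P.length := by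
      have h := hiu; push_cast at h; omega
    have hlen : (List.take m (List.drop j P)).length = m := by
      simp; omega
    refine ⟨List.take m (List.drop j P), hmem, (j : Int),
      PySem.List.mem_pyRange_one.mpr ⟨by positivity, ?_⟩, ?_⟩
    · rw [hlen]; omega
    · rw [hlen, PySem.List.slice_natCast_add]

-- ===== VERDICT (by name: the statement is the Claim_ definition above) =====
theorem check_for_phi_spec : Claim_equal_check_for_phi := by
  intro columns _
  unfold Spec_check_for_phi
  simp only [check_for_phi, check_for_phi_alt]
  apply PySem.List.foldl_congr_mem
  intro acc col _
  rw [any_indicators_eq col, set_scan_eq]
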